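-- pv_equiv track=rewrite | github.com/kapustekk/yolop | demov3.py | separate_points
-- ===== SOURCE A (Python) =====
-- def separate_points(points, left_left_lane_points,left_lane_points, right_lane_points, right_right_lane_points, img_middle):
--     left_distance_list = []
--     right_distance_list =[]
--     for point in points:
--         distance = point[0] - img_middle
--         if distance < 0:
--             left_distance_list.append(abs(distance))
--         if distance >= 0:
--             right_distance_list.append(abs(distance))
--     if len(left_distance_list)>0:
--         min_left_idx = (left_distance_list.index((min(left_distance_list))))
--         left_lane_points.append(points[min_left_idx])
--         if len(left_distance_list)>1:
--             left_left_lane_points.append(points[min_left_idx-1])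
--
--     if len(right_distance_list) > 0:
--         min_right_idx = (right_distance_list.index(min(right_distance_list)))
--         min_right_idx = min_right_idx + len(left_distance_list)
--         right_lane_points.append(points[min_right_idx])
--         if len(right_distance_list)>1:
--             right_right_lane_points.append(points[min_right_idx+1])
--
--     return left_left_lane_points, left_lane_points, right_lane_points, right_right_lane_points
-- ===== SOURCE B (Python) =====
-- def separate_points(points, left_left_lane_points, left_lane_points, right_lane_points, right_right_lane_points, img_middle):
--     # One pass: track per side the best (smallest) absolute distance, its position
--     # within that side's sequence, and running counts; no intermediate distance lists.
--     best_left = best_right = None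
--     left_pos = right_pos = 0
--     left_count = right_count = 0
--     for point in points:
--         distance = point[0] - img_middle
--         if distance < 0:
--             if best_left is None or -distance < best_left:
--                 best_left = -distance
--                 left_pos = left_count
--             left_count += 1
--         else:
--             if best_right is None or distance < best_right:
--                 best_right = distance
--                 right_pos = right_count
--             right_count += 1
--     if best_left is not None:
--         left_lane_points.append(points[left_pos])
--         if left_count > 1:
--             left_left_lane_points.append(points[left_pos - 1])
--     if best_right is not None:
--         idx = right_pos + left_count
--         right_lane_points.append(points[idx])
--         if right_count > 1:
--             right_right_lane_points.append(points[idx + 1])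
--     return left_left_lane_points, left_lane_points, right_lane_points, right_right_lane_points
-- ===== Notes on version B (the rewrite author's own statement) =====
-- stated objective: alternative
-- what changed: Replaces the two intermediate distance lists plus min()/.index() re-scans with a single pass that maintains, per side, the running minimum absolute distance, its position within that side and side counts, then performs the same appends.
import Mathlib
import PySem

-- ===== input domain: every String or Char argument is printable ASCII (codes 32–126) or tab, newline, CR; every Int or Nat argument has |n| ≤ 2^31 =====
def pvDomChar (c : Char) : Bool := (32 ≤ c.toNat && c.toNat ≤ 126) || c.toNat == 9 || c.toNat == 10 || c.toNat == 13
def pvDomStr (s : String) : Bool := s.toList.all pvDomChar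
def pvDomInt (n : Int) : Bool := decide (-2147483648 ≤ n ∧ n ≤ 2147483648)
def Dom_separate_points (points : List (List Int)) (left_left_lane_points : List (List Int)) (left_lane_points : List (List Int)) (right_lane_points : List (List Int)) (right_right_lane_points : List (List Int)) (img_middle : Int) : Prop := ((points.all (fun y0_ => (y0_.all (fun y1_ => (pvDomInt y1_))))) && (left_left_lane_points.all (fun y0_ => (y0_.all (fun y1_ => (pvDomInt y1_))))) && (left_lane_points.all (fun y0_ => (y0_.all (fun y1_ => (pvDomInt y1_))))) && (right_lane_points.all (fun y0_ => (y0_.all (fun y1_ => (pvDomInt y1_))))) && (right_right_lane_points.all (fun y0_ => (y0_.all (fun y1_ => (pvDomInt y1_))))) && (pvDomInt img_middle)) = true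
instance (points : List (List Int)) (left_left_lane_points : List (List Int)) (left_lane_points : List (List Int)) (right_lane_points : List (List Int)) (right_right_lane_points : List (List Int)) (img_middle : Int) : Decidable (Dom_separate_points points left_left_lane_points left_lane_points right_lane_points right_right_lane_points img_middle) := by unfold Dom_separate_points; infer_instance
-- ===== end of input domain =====

-- B fuses A's two distance lists and min()/.index() re-scans into one running-minimum pass;
-- same appends (mutation of the four lane lists) as A, equivalence proved on the return value.

-- ===== PORT A =====
-- loop body of A: two ifs appending abs(distance) to the left/right distance list
def pvStepA (img_middle : Int) (acc : List Int × List Int) (point : List Int) : List Int × List Int :=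
  let distance := (PySem.List.pyGet? point 0).getD 0 - img_middle   -- point[0]; Pre_ guarantees point ≠ []
  let acc := if distance < 0 then (acc.1 ++ [|distance|], acc.2) else acc
  let acc := if distance ≥ 0 then (acc.1, acc.2 ++ [|distance|]) else acc
  acc

-- l.index(min(l)) as in A (getD defaults unreachable under A's length guards)
def pvIdxMin (l : List Int) : Int :=
  (((PySem.List.index? l ((PySem.List.min? l (fun x => x)).getD 0)).getD 0 : Nat) : Int)

def separate_points (points : List (List Int)) (left_left_lane_points : List (List Int)) (left_lane_points : List (List Int)) (right_lane_points : List (List Int)) (right_right_lane_points : List (List Int)) (img_middle : Int) : List (List Int) × List (List Int) × List (List Int) × List (List Int) :=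
  let st := points.foldl (pvStepA img_middle) ([], [])
  let lds := st.1
  let rds := st.2
  let lr :=
    if ((lds.length : Int) > 0) then
      let min_left_idx := pvIdxMin lds
      let ll := left_lane_points ++ [(PySem.List.pyGet? points min_left_idx).getD []]
      let lll := if ((lds.length : Int) > 1) then left_left_lane_points ++ [(PySem.List.pyGet? points (min_left_idx - 1)).getD []] else left_left_lane_points
      (lll, ll)
    else (left_left_lane_points, left_lane_points)
  let rr :=
    if ((rds.length : Int) > 0) then
      let min_right_idx := pvIdxMin rds + (lds.length : Int)
      let rl := right_lane_points ++ [(PySem.List.pyGet? points min_right_idx).getD []]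
      let rrl := if ((rds.length : Int) > 1) then right_right_lane_points ++ [(PySem.List.pyGet? points (min_right_idx + 1)).getD []] else right_right_lane_points
      (rl, rrl)
    else (right_lane_points, right_right_lane_points)
  (lr.1, lr.2, rr.1, rr.2)

-- ===== PORT B =====
-- state: (best_left, left_pos, left_count, best_right, right_pos, right_count)
def pvAltStep (img_middle : Int) (s : Option Int × Int × Int × Option Int × Int × Int) (point : List Int) : Option Int × Int × Int × Option Int × Int × Int :=
  let distance := (PySem.List.pyGet? point 0).getD 0 - img_middle   -- point[0]; Pre_ guarantees point ≠ []
  match s with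
  | (bL, pL, cL, bR, pR, cR) =>
    if distance < 0 then
      match bL with
      | none => (some (-distance), cL, cL + 1, bR, pR, cR)
      | some b =>
        if -distance < b then (some (-distance), cL, cL + 1, bR, pR, cR)
        else (bL, pL, cL + 1, bR, pR, cR)
    else
      match bR with
      | none => (bL, pL, cL, some distance, cR, cR + 1)
      | some b =>
        if distance < b then (bL, pL, cL, some distance, cR, cR + 1)
        else (bL, pL, cL, bR, pR, cR + 1)

def separate_points_alt (points : List (List Int)) (left_left_lane_points : List (List Int)) (left_lane_points : List (List Int)) (right_lane_points : List (List Int)) (right_right_lane_points : List (List Int)) (img_middle : Int) : List (List Int) × List (List Int) × List (List Int) × List (List Int) :=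
  let s := points.foldl (pvAltStep img_middle) (none, 0, 0, none, 0, 0)
  let lr :=
    match s.1 with
    | none => (left_left_lane_points, left_lane_points)
    | some _ =>
      let ll := left_lane_points ++ [(PySem.List.pyGet? points s.2.1).getD []]
      let lll := if (s.2.2.1 > 1) then left_left_lane_points ++ [(PySem.List.pyGet? points (s.2.1 - 1)).getD []] else left_left_lane_points
      (lll, ll)
  let rr :=
    match s.2.2.2.1 with
    | none => (right_lane_points, right_right_lane_points)
    | some _ =>
      let idx := s.2.2.2.2.1 + s.2.2.1
      let rl := right_lane_points ++ [(PySem.List.pyGet? points idx).getD []]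
      let rrl := if (s.2.2.2.2.2 > 1) then right_right_lane_points ++ [(PySem.List.pyGet? points (idx + 1)).getD []] else right_right_lane_points
      (rl, rrl)
  (lr.1, lr.2, rr.1, rr.2)

-- ===== PRECONDITION & SPEC =====
-- Pre_ excludes exactly the inputs where the Python A raises: an empty point (IndexError from
-- point[0]) or, when there are at least two right-side points, the first-minimal right distance
-- sitting at the last right position (IndexError from points[min_right_idx + 1]).
def Pre_separate_points (points : List (List Int)) (left_left_lane_points : List (List Int)) (left_lane_points : List (List Int)) (right_lane_points : List (List Int)) (right_right_lane_points : List (List Int)) (img_middle : Int) : Prop :=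
  (∀ p ∈ points, p ≠ []) ∧
  (let rds := (points.filter (fun p => decide (0 ≤ p.headD 0 - img_middle))).map (fun p => p.headD 0 - img_middle)
   rds.length ≤ 1 ∨ PySem.List.index? rds ((PySem.List.min? rds (fun x => x)).getD 0) ≠ some (rds.length - 1))
instance (points : List (List Int)) (left_left_lane_points : List (List Int)) (left_lane_points : List (List Int)) (right_lane_points : List (List Int)) (right_right_lane_points : List (List Int)) (img_middle : Int) : Decidable (Pre_separate_points points left_left_lane_points left_lane_points right_lane_points right_right_lane_points img_middle) := by unfold Pre_separate_points; infer_instance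

def pvWitness_separate_points : List (List Int) × List (List Int) × List (List Int) × List (List Int) × List (List Int) × Int := ([[0], [1]], [], [], [], [], 0)

def Spec_separate_points (points : List (List Int)) (left_left_lane_points : List (List Int)) (left_lane_points : List (List Int)) (right_lane_points : List (List Int)) (right_right_lane_points : List (List Int)) (img_middle : Int) (out : List (List Int) × List (List Int) × List (List Int) × List (List Int)) : Prop := out = separate_points_alt points left_left_lane_points left_lane_points right_lane_points right_right_lane_points img_middle
instance (points : List (List Int)) (left_left_lane_points : List (List Int)) (left_lane_points : List (List Int)) (right_lane_points : List (List Int)) (right_right_lane_points : List (List Int)) (img_middle : Int) (out : List (List Int) × List (List Int) × List (List Int) × List (List Int)) : Decidable (Spec_separate_points points left_left_lane_points left_lane_points right_lane_points right_right_lane_points img_middle out) := by unfold Spec_separate_points; infer_instance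

-- ===== CLAIM (what is proved, stated in full; the proofs are below) =====
def Claim_equal_separate_points : Prop := ∀ (points : List (List Int)) (left_left_lane_points : List (List Int)) (left_lane_points : List (List Int)) (right_lane_points : List (List Int)) (right_right_lane_points : List (List Int)) (img_middle : Int), Dom_separate_points points left_left_lane_points left_lane_points right_lane_points right_right_lane_points img_middle → Pre_separate_points points left_left_lane_points left_lane_points right_lane_points right_right_lane_points img_middle → Spec_separate_points points left_left_lane_points left_lane_points right_lane_points right_right_lane_points img_middle (separate_points points left_left_lane_points left_lane_points right_lane_points right_right_lane_points img_middle)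

-- ===== LEMMAS AND PROOFS =====

-- min(l) as an Option, key = identity (B tracks it as the running minimum)
def pvMinv (l : List Int) : Option Int := PySem.List.min? l (fun x => x)

-- how B's running (best, pos) pair evolves when A appends x to a distance list
lemma pv_snoc (l : List Int) (x : Int) :
    (pvMinv (l ++ [x]), pvIdxMin (l ++ [x]))
    = (match pvMinv l with
       | none => (some x, (l.length : Int))
       | some b => if x < b then (some x, (l.length : Int)) else (pvMinv l, pvIdxMin l)) := by
  cases l with
  | nil =>
      have h0 : PySem.List.min? ([] : List Int) (fun x => x) = none :=
        (PySem.List.min?_eq_none_iff _ _).mpr rfl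
      simp [pvMinv, pvIdxMin, PySem.List.min?_id_cons, h0]
  | cons h t =>
      have hm : pvMinv (h :: t) = some (t.foldl min h) := PySem.List.min?_id_cons h t
      have hms : pvMinv ((h :: t) ++ [x]) = some (min (t.foldl min h) x) := by
        show PySem.List.min? (h :: (t ++ [x])) (fun y => y) = _
        rw [PySem.List.min?_id_cons, List.foldl_append]
        simp
      rw [hms, hm]
      by_cases hx : x < t.foldl min h
      · have hmin : min (t.foldl min h) x = x := min_eq_right hx.le
        have hnot : x ∉ (h :: t) := by
          intro hmem
          exact absurd (PySem.List.min?_isMin hm x hmem) (not_le.mpr hx)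
        have hidx : pvIdxMin ((h :: t) ++ [x]) = ((h :: t).length : Int) := by
          unfold pvIdxMin
          rw [show PySem.List.min? ((h :: t) ++ [x]) (fun y => y) = some x from by
                rw [show ((h:Int) :: t) ++ [x] = h :: (t ++ [x]) from rfl, PySem.List.min?_id_cons,
                    List.foldl_append]; simp [hmin]]
          rw [Option.getD_some, PySem.List.index?_append_singleton_self _ x hnot]
          simp
        rw [hidx]
        simp [hmin, hx]
      · have hmin : min (t.foldl min h) x = t.foldl min h := min_eq_left (not_lt.mp hx)
        have hmem : t.foldl min h ∈ (h :: t) := PySem.List.min?_mem hm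
        have hidx : pvIdxMin ((h :: t) ++ [x]) = pvIdxMin (h :: t) := by
          unfold pvIdxMin
          rw [show PySem.List.min? ((h :: t) ++ [x]) (fun y => y) = some (t.foldl min h) from by
                rw [show ((h:Int) :: t) ++ [x] = h :: (t ++ [x]) from rfl, PySem.List.min?_id_cons,
                    List.foldl_append]; simp [hmin], PySem.List.min?_id_cons h t]
          simp only [Option.getD_some]
          rw [PySem.List.index?_append_of_mem _ hmem]
        rw [hidx]
        simp [hmin, hx]


-- one loop step: B's fused state after a point equals the measures of A's lists after that point
lemma pv_step_rel (img_middle : Int) (point : List Int) (lds rds : List Int) :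
    pvAltStep img_middle (pvMinv lds, pvIdxMin lds, (lds.length : Int), pvMinv rds, pvIdxMin rds, (rds.length : Int)) point
    = (pvMinv (pvStepA img_middle (lds, rds) point).1, pvIdxMin (pvStepA img_middle (lds, rds) point).1,
       (((pvStepA img_middle (lds, rds) point).1.length : Int)),
       pvMinv (pvStepA img_middle (lds, rds) point).2, pvIdxMin (pvStepA img_middle (lds, rds) point).2,
       (((pvStepA img_middle (lds, rds) point).2.length : Int))) := by
  unfold pvAltStep pvStepA
  set d := (PySem.List.pyGet? point 0).getD 0 - img_middle with hdset
  by_cases hd : d < 0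
  · have habs : |d| = -d := abs_of_neg hd
    have hs := pv_snoc lds (-d)
    simp only [hd, if_true, not_le.mpr hd, if_false, habs]
    rw [Prod.ext_iff] at hs
    cases hmv : pvMinv lds with
    | none =>
        simp only [hmv] at hs
        simp [hs.1, hs.2, List.length_append]
    | some b =>
        simp only [hmv] at hs
        by_cases hlt : -d < b
        · simp only [hlt, if_true] at hs ⊢
          simp [hs.1, hs.2, List.length_append]
        · simp only [hlt, if_false] at hs ⊢
          simp [hs.1, hs.2, List.length_append]
  · have habs : |d| = d := abs_of_nonneg (not_lt.mp hd)
    have hs := pv_snoc rds d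
    simp only [hd, if_false, not_lt.mp hd, if_true, habs]
    rw [Prod.ext_iff] at hs
    cases hmv : pvMinv rds with
    | none =>
        simp only [hmv] at hs
        simp [hs.1, hs.2, List.length_append]
    | some b =>
        simp only [hmv] at hs
        by_cases hlt : d < b
        · simp only [hlt, if_true] at hs ⊢
          simp [hs.1, hs.2, List.length_append]
        · simp only [hlt, if_false] at hs ⊢
          simp [hs.1, hs.2, List.length_append]


-- the whole loop: B's single pass computes the measures of A's two distance lists
lemma pv_fold_rel (img_middle : Int) (points : List (List Int)) : ∀ (lds rds : List Int),
    points.foldl (pvAltStep img_middle) (pvMinv lds, pvIdxMin lds, (lds.length : Int), pvMinv rds, pvIdxMin rds, (rds.length : Int))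
    = (pvMinv (points.foldl (pvStepA img_middle) (lds, rds)).1, pvIdxMin (points.foldl (pvStepA img_middle) (lds, rds)).1,
       ((points.foldl (pvStepA img_middle) (lds, rds)).1.length : Int),
       pvMinv (points.foldl (pvStepA img_middle) (lds, rds)).2, pvIdxMin (points.foldl (pvStepA img_middle) (lds, rds)).2,
       ((points.foldl (pvStepA img_middle) (lds, rds)).2.length : Int)) := by
  induction points with
  | nil => intro lds rds; rfl
  | cons point rest ih =>
      intro lds rds
      simp only [List.foldl_cons, pv_step_rel]
      exact ih (pvStepA img_middle (lds, rds) point).1 (pvStepA img_middle (lds, rds) point).2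

lemma pvMinv_nil : pvMinv ([] : List Int) = none := (PySem.List.min?_eq_none_iff _ _).mpr rfl

-- the two assembled results coincide
lemma pv_main (points left_left_lane_points left_lane_points right_lane_points right_right_lane_points : List (List Int)) (img_middle : Int) :
    separate_points points left_left_lane_points left_lane_points right_lane_points right_right_lane_points img_middle
    = separate_points_alt points left_left_lane_points left_lane_points right_lane_points right_right_lane_points img_middle := by
  unfold separate_points separate_points_alt
  have hinit : ((none, 0, 0, none, 0, 0) : Option Int × Int × Int × Option Int × Int × Int)
      = (pvMinv [], pvIdxMin [], (([] : List Int).length : Int), pvMinv [], pvIdxMin [], (([] : List Int).length : Int)) := by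
    simp [pvMinv_nil, pvIdxMin, PySem.List.index?_eq_idxOf?]
  rw [hinit, pv_fold_rel]
  generalize points.foldl (pvStepA img_middle) ([], []) = st
  obtain ⟨lds, rds⟩ := st
  simp only []
  cases hL : pvMinv lds with
  | none =>
      have hl0 : lds = [] := (PySem.List.min?_eq_none_iff _ _).mp hL
      cases hR : pvMinv rds with
      | none =>
          have hr0 : rds = [] := (PySem.List.min?_eq_none_iff _ _).mp hR
          subst hl0 hr0; simp
      | some b =>
          have hr : rds ≠ [] := by rintro rfl; rw [pvMinv_nil] at hR; cases hR
          have hrp : (0:Int) < (rds.length : Int) := by exact_mod_cast List.length_pos_iff.mpr hr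
          subst hl0; simp [hrp, hr, List.length_pos_iff]
  | some b =>
      have hl : lds ≠ [] := by rintro rfl; rw [pvMinv_nil] at hL; cases hL
      have hlp : (0:Int) < (lds.length : Int) := by exact_mod_cast List.length_pos_iff.mpr hl
      cases hR : pvMinv rds with
      | none =>
          have hr0 : rds = [] := (PySem.List.min?_eq_none_iff _ _).mp hR
          subst hr0; simp [hlp, hl, List.length_pos_iff]
      | some c =>
          have hr : rds ≠ [] := by rintro rfl; rw [pvMinv_nil] at hR; cases hR
          have hrp : (0:Int) < (rds.length : Int) := by exact_mod_cast List.length_pos_iff.mpr hr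
          simp [hlp, hrp, hl, hr, List.length_pos_iff]

-- ===== VERDICT (by name: the statement is the Claim_ definition above) =====
theorem separate_points_spec : Claim_equal_separate_points := by
  intro points left_left_lane_points left_lane_points right_lane_points right_right_lane_points img_middle _ _
  unfold Spec_separate_points
  exact pv_main points left_left_lane_points left_lane_points right_lane_points right_right_lane_points img_middle
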